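-- pv_equiv track=rewrite | github.com/rAndrewNichol/random | Python/Screwin/lawrencealgo.py | sum_32
-- ===== SOURCE A (Python) =====
-- def sum_32(total, num_cards, cards_used):
--     if num_cards == 5:
--         if total == 32:
--             return 1
--         else:
--             return 0
--     count = 0
--     for i in range(cards_used[-1],14):
--         if i not in cards_used:
--             count += sum_32(total + i, num_cards + 1, cards_used + [i])
--     return count
-- ===== SOURCE B (Python) =====
-- def sum_32(total, num_cards, cards_used):
--     if num_cards == 5:
--         return 1 if total == 32 else 0
--     last = cards_used[-1]
--     need = 5 - num_cards
--     if need < 0: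
--         return 0
--     target = 32 - total
--     values = [v for v in range(last + 1, 14) if v not in cards_used]
--     # dp maps (k, s) -> number of k-element subsets of the processed values summing to s
--     dp = {(0, 0): 1}
--     for v in values:
--         new = dict(dp)
--         for (k, s), c in dp.items():
--             if k < need:
--                 key = (k + 1, s + v)
--                 new[key] = new.get(key, 0) + c
--         dp = new
--     return dp.get((need, target), 0)
-- ===== Notes on version B (the rewrite author's own statement) =====
-- stated objective: alternative
-- what changed: Replaced A's recursive DFS over candidate cards (which rescans cards_used and copies the list at every node) by deriving values/need/target once and counting size-need subsets of the allowed values summing to target with a subset-sum dynamic-programming table keyed by (count, sum).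
import Mathlib
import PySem

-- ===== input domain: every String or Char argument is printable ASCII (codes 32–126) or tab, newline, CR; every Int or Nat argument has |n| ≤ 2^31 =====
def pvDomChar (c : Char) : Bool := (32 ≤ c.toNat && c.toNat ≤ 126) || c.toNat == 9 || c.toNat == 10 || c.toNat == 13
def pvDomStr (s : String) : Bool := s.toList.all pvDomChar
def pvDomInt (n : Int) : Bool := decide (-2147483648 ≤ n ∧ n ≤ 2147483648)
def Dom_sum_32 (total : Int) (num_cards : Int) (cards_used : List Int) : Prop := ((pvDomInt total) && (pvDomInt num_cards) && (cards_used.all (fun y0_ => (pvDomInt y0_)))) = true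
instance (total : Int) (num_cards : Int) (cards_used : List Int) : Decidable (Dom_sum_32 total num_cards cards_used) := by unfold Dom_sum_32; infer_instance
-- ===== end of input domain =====

-- B replaces A's recursive DFS by a subset-sum DP over (count, sum) pairs (alternative algorithm); return-value equivalence on Pre_ (neither mutates its arguments).

-- ===== PORT A =====
-- A's recursion depth is bounded by 14 - cards_used[-1] (each recursive call appends a
-- strictly larger last card, capped at 13), so the fuel passed by sum_32 below is always
-- sufficient; the fuel-0 branch is a totality guard only, never reached from sum_32 on Pre_.
def sum32Fuel (fuel : Nat) (total : Int) (num_cards : Int) (cards_used : List Int) : Int :=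
  if num_cards = 5 then (if total = 32 then 1 else 0)
  else
    match PySem.List.pyGet? cards_used (-1) with
    | none => 0  -- Python raises IndexError here (empty cards_used); excluded by Pre_
    | some last =>
      match fuel with
      | 0 => 0
      | f + 1 =>
        (PySem.List.pyRange last 14 1).foldl
          (fun count i =>
            if i ∈ cards_used then count
            else count + sum32Fuel f (total + i) (num_cards + 1) (cards_used ++ [i]))
          0

def sum_32 (total : Int) (num_cards : Int) (cards_used : List Int) : Int :=
  sum32Fuel ((14 - ((PySem.List.pyGet? cards_used (-1)).getD 14)).toNat + 1) total num_cards cards_used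

-- ===== PORT B =====
def sum_32_alt (total : Int) (num_cards : Int) (cards_used : List Int) : Int :=
  if num_cards = 5 then (if total = 32 then 1 else 0)
  else
    match PySem.List.pyGet? cards_used (-1) with
    | none => 0  -- Python raises IndexError here (empty cards_used); excluded by Pre_
    | some last =>
      let need : Int := 5 - num_cards
      if need < 0 then 0
      else
        let target : Int := 32 - total
        let values : List Int := (PySem.List.pyRange (last + 1) 14 1).filter (fun v => decide (v ∉ cards_used))
        let dp : PySem.Dict (Int × Int) Int :=
          values.foldl
            (fun dp v =>
              dp.items.foldl
                (fun nd kv =>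
                  if kv.1.1 < need then
                    nd.insert (kv.1.1 + 1, kv.1.2 + v) (nd.getD (kv.1.1 + 1, kv.1.2 + v) 0 + kv.2)
                  else nd)
                dp)
            (PySem.Dict.empty.insert ((0 : Int), (0 : Int)) (1 : Int))
        dp.getD (need, target) 0

-- ===== PRECONDITION & SPEC =====
-- Pre_ excludes exactly the inputs where Python A raises IndexError (cards_used == [] with num_cards != 5).
def Pre_sum_32 (total : Int) (num_cards : Int) (cards_used : List Int) : Prop :=
  num_cards = 5 ∨ cards_used ≠ []
instance (total : Int) (num_cards : Int) (cards_used : List Int) : Decidable (Pre_sum_32 total num_cards cards_used) := by unfold Pre_sum_32; infer_instance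

def pvWitness_sum_32 : Int × Int × List Int := (3, 1, [3])

def Spec_sum_32 (total : Int) (num_cards : Int) (cards_used : List Int) (out : Int) : Prop := out = sum_32_alt total num_cards cards_used
instance (total : Int) (num_cards : Int) (cards_used : List Int) (out : Int) : Decidable (Spec_sum_32 total num_cards cards_used out) := by unfold Spec_sum_32; infer_instance

-- ===== CLAIM (what is proved, stated in full; the proofs are below) =====
def Claim_equal_sum_32 : Prop := ∀ (total : Int) (num_cards : Int) (cards_used : List Int), Dom_sum_32 total num_cards cards_used → Pre_sum_32 total num_cards cards_used → Spec_sum_32 total num_cards cards_used (sum_32 total num_cards cards_used)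

-- ===== LEMMAS AND PROOFS =====

-- N l k s = number of k-element subsets of l with sum s (0 for k < 0).
def N : List Int → Int → Int → Int
  | [], k, s => if k = 0 ∧ s = 0 then 1 else 0
  | v :: vs, k, s => N vs k s + (if 1 ≤ k then N vs (k - 1) (s - v) else 0)

theorem N_zero (l : List Int) (s : Int) : N l 0 s = if s = 0 then 1 else 0 := by
  induction l with
  | nil => simp [N]
  | cons v vs ih => simp [N, ih]

theorem N_neg (l : List Int) (k s : Int) (hk : k < 0) : N l k s = 0 := by
  induction l generalizing k s with
  | nil => simp [N]; omega
  | cons v vs ih => simp [N, ih k s hk]; omega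

theorem N_snoc (l : List Int) (v k s : Int) :
    N (l ++ [v]) k s = N l k s + (if 1 ≤ k then N l (k - 1) (s - v) else 0) := by
  induction l generalizing k s with
  | nil => simp [N]
  | cons u us ih =>
    simp only [List.cons_append, N, ih]
    by_cases h1 : 1 ≤ k
    · by_cases h2 : 1 ≤ k - 1
      · simp [h1, h2]
        have : s - u - v = s - v - u := by ring
        rw [this]; ring
      · simp [h1, h2]; ring
    · simp [h1]

-- the allowed values above M: filter of range(M, 14) by not-membership
def valsF (cards : List Int) (M : Int) : List Int :=
  (PySem.List.pyRange M 14 1).filter (fun v => decide (v ∉ cards))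

theorem valsF_ge (cards : List Int) (M : Int) (h : 14 ≤ M) : valsF cards M = [] := by
  unfold valsF
  rw [PySem.List.pyRange_one_eq_nil (by omega)]
  rfl

theorem valsF_step (cards : List Int) (M : Int) (h : M < 14) :
    valsF cards M =
      if M ∈ cards then valsF cards (M + 1) else M :: valsF cards (M + 1) := by
  unfold valsF
  rw [PySem.List.pyRange_one_cons h]
  by_cases hm : M ∈ cards <;> simp [hm]

theorem valsF_snoc (cards : List Int) (i M : Int) (h : i < M) :
    valsF (cards ++ [i]) M = valsF cards M := by
  unfold valsF
  apply List.filter_congr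
  intro x hx
  rw [PySem.List.mem_pyRange_one] at hx
  simp only [List.mem_append, List.mem_singleton, decide_eq_decide]
  constructor
  · intro hn hmem; exact hn (Or.inl hmem)
  · intro hn hmem
    rcases hmem with h1 | h2
    · exact hn h1
    · omega

theorem sum32Fuel_eq_N :
    ∀ (fuel : Nat) (L : Int) (cards : List Int) (total nc : Int),
      PySem.List.pyGet? cards (-1) = some L → (14 - L).toNat < fuel →
      sum32Fuel fuel total nc cards =
        if nc = 5 then (if total = 32 then 1 else 0)
        else N (valsF cards L) (5 - nc) (32 - total) := by
  intro fuel
  induction fuel with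
  | zero => intro L cards total nc _ hfuel; omega
  | succ f ih =>
    intro L cards total nc hget hfuel
    by_cases hnc : nc = 5
    · unfold sum32Fuel; simp [hnc]
    · have hLmem : L ∈ cards := PySem.List.mem_of_pyGet?_eq_some cards hget
      have hk' : (5 : Int) - nc ≠ 0 := by omega
      conv_lhs => rw [sum32Fuel]
      rw [if_neg hnc, hget]
      -- the loop: fold over range(M,14) computes acc + N (valsF cards M) (5-nc) (32-total)
      have aux : ∀ (n : Nat) (M acc : Int), (14 - M).toNat ≤ n → L ≤ M →
          (PySem.List.pyRange M 14 1).foldl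
            (fun count i =>
              if i ∈ cards then count
              else count + sum32Fuel f (total + i) (nc + 1) (cards ++ [i]))
            acc
          = acc + N (valsF cards M) (5 - nc) (32 - total) := by
        intro n
        induction n with
        | zero =>
          intro M acc hn hLM
          have h14 : 14 ≤ M := by omega
          rw [PySem.List.pyRange_one_eq_nil (by omega), valsF_ge cards M h14]
          simp [N, hk']
        | succ m ihm =>
          intro M acc hn hLM
          by_cases h14 : 14 ≤ M
          · rw [PySem.List.pyRange_one_eq_nil (by omega), valsF_ge cards M h14]
            simp [N, hk']
          · have hM14 : M < 14 := by omega
            rw [PySem.List.pyRange_one_cons hM14]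
            simp only [List.foldl_cons]
            by_cases hMc : M ∈ cards
            · rw [if_pos hMc, ihm (M + 1) acc (by omega) (by omega),
                valsF_step cards M hM14, if_pos hMc]
            · rw [if_neg hMc]
              have hML : L < M := by
                rcases lt_or_eq_of_le hLM with h | h
                · exact h
                · exact absurd (h ▸ hLmem) hMc
              -- the recursive call equals N (valsF cards (M+1)) (5-nc-1) (32-total-M)
              have hrec : sum32Fuel f (total + M) (nc + 1) (cards ++ [M])
                  = N (valsF cards (M + 1)) (5 - nc - 1) (32 - total - M) := by
                have hget' : PySem.List.pyGet? (cards ++ [M]) (-1) = some M :=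
                  PySem.List.pyGet?_neg_one_append_singleton cards M
                rw [ih M (cards ++ [M]) (total + M) (nc + 1) hget' (by omega)]
                have hv : valsF (cards ++ [M]) M = valsF cards (M + 1) := by
                  rw [valsF_step (cards ++ [M]) M hM14,
                    if_pos (by simp : M ∈ cards ++ [M]),
                    valsF_snoc cards M (M + 1) (by omega)]
                by_cases h5 : nc + 1 = 5
                · have : (5 : Int) - nc - 1 = 0 := by omega
                  rw [if_pos h5, this, N_zero]
                  split_ifs with a b c <;> omega
                · rw [if_neg h5, hv]
                  congr 1 <;> omega
              rw [hrec, ihm (M + 1) _ (by omega) (by omega),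
                valsF_step cards M hM14, if_neg hMc]
              simp only [N]
              by_cases h1 : 1 ≤ (5 : Int) - nc
              · rw [if_pos h1]; ring
              · rw [if_neg h1,
                  N_neg (valsF cards (M + 1)) (5 - nc - 1) (32 - total - M) (by omega)]
                ring
      have hfin := aux ((14 - L).toNat + 1) L 0 (by omega) le_rfl
      rw [zero_add] at hfin
      rw [if_neg hnc]
      exact hfin

-- generic inner loop: fold of conditional shifted inserts over a snapshot list of entries of dp
theorem inner_gen (need v : Int) (dp : PySem.Dict (Int × Int) Int) :
    ∀ (l : List ((Int × Int) × Int)) (nd : PySem.Dict (Int × Int) Int),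
      (∀ p ∈ l, dp.getD p.1 0 = p.2) → (l.map Prod.fst).Nodup →
      ∀ q : Int × Int,
        (l.foldl
          (fun nd kv =>
            if kv.1.1 < need then
              nd.insert (kv.1.1 + 1, kv.1.2 + v) (nd.getD (kv.1.1 + 1, kv.1.2 + v) 0 + kv.2)
            else nd)
          nd).getD q 0
        = nd.getD q 0 +
            (if (q.1 - 1, q.2 - v) ∈ l.map Prod.fst ∧ q.1 - 1 < need
             then dp.getD (q.1 - 1, q.2 - v) 0 else 0) := by
  intro l
  induction l with
  | nil => intro nd _ _ q; simp
  | cons p l ih =>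
    obtain ⟨⟨k, s⟩, c⟩ := p
    intro nd hb hnd q
    have hbt : ∀ p ∈ l, dp.getD p.1 0 = p.2 := fun p hp => hb p (List.mem_cons_of_mem _ hp)
    have hc : dp.getD (k, s) 0 = c := hb _ (List.mem_cons_self)
    rw [List.map_cons, List.nodup_cons] at hnd
    obtain ⟨hknotin, hndt⟩ := hnd
    simp only [List.foldl_cons]
    by_cases hk : k < need
    · simp only [if_pos hk]
      rw [ih _ hbt hndt q]
      by_cases hq : q = (k + 1, s + v)
      · subst hq
        have hpre : ((k + 1 : Int) - 1, (s + v : Int) - v) = (k, s) := by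
          simp
        rw [PySem.Dict.getD_insert]
        rw [if_pos rfl]
        rw [List.map_cons]
        simp only [hpre]
        rw [if_neg (by intro hmem; exact hknotin hmem.1),
          if_pos ⟨List.mem_cons_self, by omega⟩, hc]
        ring
      · rw [PySem.Dict.getD_insert, if_neg hq, List.map_cons]
        have hpq : ((q.1 - 1, q.2 - v) ∈ (k, s) :: l.map Prod.fst ∧ q.1 - 1 < need)
            ↔ ((q.1 - 1, q.2 - v) ∈ l.map Prod.fst ∧ q.1 - 1 < need) := by
          constructor
          · rintro ⟨hm, hlt⟩
            rcases List.mem_cons.mp hm with he | hm'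
            · exfalso
              apply hq
              have h1 : q.1 - 1 = k := by rw [Prod.ext_iff] at he; exact he.1
              have h2 : q.2 - v = s := by rw [Prod.ext_iff] at he; exact he.2
              have : q = (q.1, q.2) := rfl
              rw [this, Prod.mk.injEq]; omega
            · exact ⟨hm', hlt⟩
          · rintro ⟨hm, hlt⟩; exact ⟨List.mem_cons_of_mem _ hm, hlt⟩
        rw [if_congr hpq rfl rfl]
    · simp only [if_neg hk]
      rw [ih _ hbt hndt q, List.map_cons]
      have hpq : ((q.1 - 1, q.2 - v) ∈ (k, s) :: l.map Prod.fst ∧ q.1 - 1 < need)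
          ↔ ((q.1 - 1, q.2 - v) ∈ l.map Prod.fst ∧ q.1 - 1 < need) := by
        constructor
        · rintro ⟨hm, hlt⟩
          rcases List.mem_cons.mp hm with he | hm'
          · exfalso
            have h1 : q.1 - 1 = k := by rw [Prod.ext_iff] at he; exact he.1
            omega
          · exact ⟨hm', hlt⟩
        · rintro ⟨hm, hlt⟩; exact ⟨List.mem_cons_of_mem _ hm, hlt⟩
      rw [if_congr hpq rfl rfl]

theorem inner_fold (need v : Int) (dp : PySem.Dict (Int × Int) Int) (hnd : dp.keys.Nodup)
    (q : Int × Int) :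
    (dp.items.foldl
      (fun nd kv =>
        if kv.1.1 < need then
          nd.insert (kv.1.1 + 1, kv.1.2 + v) (nd.getD (kv.1.1 + 1, kv.1.2 + v) 0 + kv.2)
        else nd)
      dp).getD q 0
    = dp.getD q 0 +
        (if (q.1 - 1, q.2 - v) ∈ dp.keys ∧ q.1 - 1 < need
         then dp.getD (q.1 - 1, q.2 - v) 0 else 0) := by
  have hkeys : dp.keys = dp.items.map Prod.fst := rfl
  rw [hkeys] at hnd ⊢
  exact inner_gen need v dp dp.items dp
    (fun p hp => PySem.Dict.getD_of_mem_items dp (by exact hp) hnd 0) hnd q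

theorem inner_nodup (need v : Int) :
    ∀ (l : List ((Int × Int) × Int)) (nd : PySem.Dict (Int × Int) Int), nd.keys.Nodup →
      (l.foldl
        (fun nd kv =>
          if kv.1.1 < need then
            nd.insert (kv.1.1 + 1, kv.1.2 + v) (nd.getD (kv.1.1 + 1, kv.1.2 + v) 0 + kv.2)
          else nd)
        nd).keys.Nodup := by
  intro l
  induction l with
  | nil => intro nd h; exact h
  | cons p l ih =>
    intro nd h
    simp only [List.foldl_cons]
    apply ih
    by_cases hk : p.1.1 < need
    · simp only [if_pos hk]
      exact PySem.Dict.nodup_keys_insert _ _ _ h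
    · simp only [if_neg hk]; exact h

theorem dp_nodup (need : Int) (values : List Int) :
    ∀ (nd : PySem.Dict (Int × Int) Int), nd.keys.Nodup →
      (values.foldl
        (fun dp v =>
          dp.items.foldl
            (fun nd kv =>
              if kv.1.1 < need then
                nd.insert (kv.1.1 + 1, kv.1.2 + v) (nd.getD (kv.1.1 + 1, kv.1.2 + v) 0 + kv.2)
              else nd)
            dp)
        nd).keys.Nodup := by
  induction values with
  | nil => intro nd h; exact h
  | cons v vs ih =>
    intro nd h
    simp only [List.foldl_cons]
    exact ih _ (inner_nodup need v nd.items nd h)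

theorem dp_getD (need : Int) (hneed : 0 ≤ need) (values : List Int) (k s : Int) :
    (values.foldl
      (fun dp v =>
        dp.items.foldl
          (fun nd kv =>
            if kv.1.1 < need then
              nd.insert (kv.1.1 + 1, kv.1.2 + v) (nd.getD (kv.1.1 + 1, kv.1.2 + v) 0 + kv.2)
            else nd)
          dp)
      (PySem.Dict.empty.insert ((0 : Int), (0 : Int)) (1 : Int))).getD (k, s) 0
    = if 0 ≤ k ∧ k ≤ need then N values k s else 0 := by
  induction values using List.reverseRecOn generalizing k s with
  | nil =>
    simp only [List.foldl_nil]
    rw [PySem.Dict.getD_insert]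
    simp only [N]
    by_cases h0 : ((k, s) : Int × Int) = (0, 0)
    · rw [if_pos h0]
      rw [Prod.mk.injEq] at h0
      rw [if_pos (by omega), if_pos (by omega)]
    · rw [if_neg h0, PySem.Dict.getD_empty]
      rw [Prod.mk.injEq] at h0
      by_cases hk : 0 ≤ k ∧ k ≤ need
      · rw [if_pos hk, if_neg (by tauto)]
      · rw [if_neg hk]
  | append_singleton vs v ih =>
    rw [List.foldl_append, List.foldl_cons, List.foldl_nil]
    set dp := vs.foldl
      (fun dp v =>
        dp.items.foldl
          (fun nd kv =>
            if kv.1.1 < need then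
              nd.insert (kv.1.1 + 1, kv.1.2 + v) (nd.getD (kv.1.1 + 1, kv.1.2 + v) 0 + kv.2)
            else nd)
          dp)
      (PySem.Dict.empty.insert ((0 : Int), (0 : Int)) (1 : Int)) with hdp
    have hnd : dp.keys.Nodup := by
      rw [hdp]
      exact dp_nodup need vs _ (PySem.Dict.nodup_keys_insert _ _ _ PySem.Dict.nodup_keys_empty)
    rw [inner_fold need v dp hnd (k, s)]
    have hstep : dp.getD (k, s) 0 +
        (if ((k, s).1 - 1, (k, s).2 - v) ∈ dp.keys ∧ (k, s).1 - 1 < need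
         then dp.getD ((k, s).1 - 1, (k, s).2 - v) 0 else 0)
        = dp.getD (k, s) 0 + (if k - 1 < need then dp.getD (k - 1, s - v) 0 else 0) := by
      by_cases hm : ((k - 1, s - v) : Int × Int) ∈ dp.keys
      · simp [hm]
      · have hz : dp.getD (k - 1, s - v) 0 = 0 := by
          apply PySem.Dict.getD_of_not_contains
          rw [← Bool.not_eq_true, PySem.Dict.contains_iff_mem_keys]
          exact hm
        simp [hm, hz]
    rw [hstep, ih k s, ih (k - 1) (s - v), N_snoc]
    by_cases h1 : 0 ≤ k ∧ k ≤ need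
    · rw [if_pos h1, if_pos h1, if_pos (by omega : k - 1 < need)]
      by_cases h2 : 1 ≤ k
      · rw [if_pos (by omega : 0 ≤ k - 1 ∧ k - 1 ≤ need), if_pos h2]
      · rw [if_neg (by omega : ¬(0 ≤ k - 1 ∧ k - 1 ≤ need)), if_neg h2]
    · rw [if_neg h1, if_neg h1]
      by_cases h3 : k - 1 < need
      · rw [if_pos h3, if_neg (by omega : ¬(0 ≤ k - 1 ∧ k - 1 ≤ need))]
        ring
      · rw [if_neg h3]
        ring

theorem alt_eq_N (total nc : Int) (cards : List Int) (L : Int)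
    (hget : PySem.List.pyGet? cards (-1) = some L) (hnc : nc ≠ 5) (hneed : 0 ≤ 5 - nc) :
    sum_32_alt total nc cards = N (valsF cards (L + 1)) (5 - nc) (32 - total) := by
  unfold sum_32_alt
  rw [if_neg hnc, hget]
  simp only [if_neg (by omega : ¬(5 - nc < 0))]
  have h := dp_getD (5 - nc) hneed
    ((PySem.List.pyRange (L + 1) 14 1).filter (fun v => decide (v ∉ cards)))
    (5 - nc) (32 - total)
  rw [if_pos ⟨hneed, le_refl _⟩] at h
  exact h

-- ===== VERDICT (by name: the statement is the Claim_ definition above) =====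
theorem sum_32_spec : Claim_equal_sum_32 := by
  intro total nc cards _ hpre
  unfold Spec_sum_32
  by_cases hnc : nc = 5
  · subst hnc
    unfold sum_32 sum32Fuel sum_32_alt
    simp
  · have hne : cards ≠ [] := by
      rcases hpre with h | h
      · exact absurd h hnc
      · exact h
    obtain ⟨L, hget⟩ : ∃ L, PySem.List.pyGet? cards (-1) = some L := by
      rw [PySem.List.pyGet?_neg_one]
      cases hc : cards.getLast? with
      | none => exact absurd (List.getLast?_eq_none_iff.mp hc) hne
      | some x => exact ⟨x, rfl⟩
    have hLmem : L ∈ cards := PySem.List.mem_of_pyGet?_eq_some cards hget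
    have hA : sum_32 total nc cards = N (valsF cards L) (5 - nc) (32 - total) := by
      unfold sum_32
      rw [hget, Option.getD_some]
      rw [sum32Fuel_eq_N _ L cards total nc hget (by omega), if_neg hnc]
    have hLL : valsF cards L = valsF cards (L + 1) := by
      by_cases h14 : L < 14
      · rw [valsF_step cards L h14, if_pos hLmem]
      · rw [valsF_ge cards L (by omega), valsF_ge cards (L + 1) (by omega)]
    by_cases hneed : 0 ≤ 5 - nc
    · rw [hA, hLL, alt_eq_N total nc cards L hget hnc hneed]
    · rw [hA, N_neg _ _ _ (by omega)]
      have hlt : (5 : Int) - nc < 0 := by omega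
      symm
      simp [sum_32_alt, hnc, hget, hlt]
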